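-- pv_equiv track=rewrite | github.com/AuralAlchemy/MIDI_Generator_Aural_Alchemy_Streamlit | app.py | _adjacent_pc
-- ===== SOURCE A (Python) =====
-- from typing import List, Optional, Dict, Tuple
--
-- def _pcset(notes: List[int]) -> set:
--     return {int(p) % 12 for p in notes}
--
-- def _adjacent_pc(prev: List[int], cur: List[int], dist: int = 1) -> int:
--     """
--     Counts how many pitch-classes in 'cur' are within +/-dist semitones
--     of any pitch-class in 'prev'.
--     dist=1 -> semitone adjacency
--     dist=2 -> semitone + whole-tone adjacency
--     """
--     A = _pcset(prev)
--     B = _pcset(cur)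
--     if not A or not B:
--         return 0
--
--     targets = set()
--     for pc in A:
--         for d in range(1, dist + 1):
--             targets.add((pc + d) % 12)
--             targets.add((pc - d) % 12)
--
--     return len(B & targets)
-- ===== SOURCE B (Python) =====
-- from typing import List
--
--
-- def _pcset(notes: List[int]) -> set:
--     return {int(p) % 12 for p in notes}
--
--
-- def _adjacent_pc(prev: List[int], cur: List[int], dist: int = 1) -> int:
--     # Count the pitch-classes of cur that have some pitch-class of prev at
--     # circular (mod-12) distance between 1 and dist semitones.
--     A = _pcset(prev)
--     B = _pcset(cur)
--     return sum(1 for b in B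
--                if any(1 <= min((b - a) % 12, (a - b) % 12) <= dist for a in A))
-- ===== Notes on version B (the rewrite author's own statement) =====
-- stated objective: faster
-- what changed: Replaces building the +/-d neighbor target set (a loop over range(1, dist+1) per prev pitch-class, then a set intersection) by a direct count of the cur pitch-classes having some prev pitch-class at circular mod-12 distance in [1, dist]; no intermediate set is built.
-- intended difference: When dist >= 12 and prev reduces to a single pitch class that also occurs in cur, A's mod-12 wraparound ((pc+12)%12 = pc) accidentally counts that exact match and returns one more than B; B consistently excludes exact matches, as A's d-loop starting at 1 intends for every dist < 12. — e.g. on _adjacent_pc([0], [0], 12): A returns 1, B returns 0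
import Mathlib
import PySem

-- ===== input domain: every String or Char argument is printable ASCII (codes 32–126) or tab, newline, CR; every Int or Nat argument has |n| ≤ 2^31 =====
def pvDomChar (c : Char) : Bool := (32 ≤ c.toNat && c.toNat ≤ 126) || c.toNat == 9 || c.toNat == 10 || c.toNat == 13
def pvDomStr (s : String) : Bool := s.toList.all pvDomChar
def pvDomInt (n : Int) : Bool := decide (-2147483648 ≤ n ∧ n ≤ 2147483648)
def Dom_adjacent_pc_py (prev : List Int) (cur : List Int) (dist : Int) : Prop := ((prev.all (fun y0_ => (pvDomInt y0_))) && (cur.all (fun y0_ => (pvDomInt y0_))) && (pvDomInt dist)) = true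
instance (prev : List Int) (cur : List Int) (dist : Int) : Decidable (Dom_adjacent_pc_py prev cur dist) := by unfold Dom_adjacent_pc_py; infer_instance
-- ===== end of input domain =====

-- B counts the cur pitch-classes with some prev pitch-class at circular mod-12 distance in [1, dist],
-- instead of A's precomputed ±d neighbor target set; objective: faster (measured).

-- ===== PORT A =====
-- shared helper: Python's _pcset
def pcset_py (notes : List Int) : PySem.Set Int :=
  PySem.Set.ofList (notes.map (fun p => PySem.Int.mod p 12))

def adjacent_pc_py (prev : List Int) (cur : List Int) (dist : Int) : Int :=
  let A := pcset_py prev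
  let B := pcset_py cur
  if A = [] ∨ B = [] then 0
  else
    let targets : PySem.Set Int :=
      A.foldl (fun t pc =>
        (PySem.List.pyRange 1 (dist + 1)).foldl
          (fun t d =>
            PySem.Set.add (PySem.Set.add t (PySem.Int.mod (pc + d) 12))
              (PySem.Int.mod (pc - d) 12)) t)
        PySem.Set.empty
    PySem.Set.len (PySem.Set.inter B targets)

-- ===== PORT B =====
def adjacent_pc_py_alt (prev : List Int) (cur : List Int) (dist : Int) : Int :=
  let A := pcset_py prev
  let B := pcset_py cur
  ((B.countP (fun b => A.any (fun a =>
      let m := min (PySem.Int.mod (b - a) 12) (PySem.Int.mod (a - b) 12)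
      decide (1 ≤ m ∧ m ≤ dist))) : Nat) : Int)

-- ===== PRECONDITION & SPEC =====
-- When dist ≥ 12 and prev reduces to a single pitch class also occurring in cur, A's mod-12
-- wraparound ((pc+12)%12 = pc) accidentally counts that exact match and returns one more than B;
-- B consistently excludes exact matches, as A's d-loop starting at 1 intends for every dist < 12.
def D_adjacent_pc_py (prev : List Int) (cur : List Int) (dist : Int) : Prop :=
  12 ≤ dist ∧ prev ≠ [] ∧
    (∀ p ∈ prev, PySem.Int.mod p 12 = PySem.Int.mod prev.head! 12) ∧
    (∃ c ∈ cur, PySem.Int.mod c 12 = PySem.Int.mod prev.head! 12)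
instance (prev : List Int) (cur : List Int) (dist : Int) : Decidable (D_adjacent_pc_py prev cur dist) := by unfold D_adjacent_pc_py; infer_instance

def Spec_adjacent_pc_py (prev : List Int) (cur : List Int) (dist : Int) (out : Int) : Prop := ¬ D_adjacent_pc_py prev cur dist → out = adjacent_pc_py_alt prev cur dist
instance (prev : List Int) (cur : List Int) (dist : Int) (out : Int) : Decidable (Spec_adjacent_pc_py prev cur dist out) := by unfold Spec_adjacent_pc_py; infer_instance

def pvDiffWitness_adjacent_pc_py : List Int × List Int × Int := ([0], [0], 12)
def pvDiffWitnessOut_adjacent_pc_py : Int × Int := (1, 0)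

-- ===== CLAIM (what is proved, stated in full; the proofs are below) =====
def Claim_unchanged_adjacent_pc_py : Prop := ∀ (prev : List Int) (cur : List Int) (dist : Int), Dom_adjacent_pc_py prev cur dist → Spec_adjacent_pc_py prev cur dist (adjacent_pc_py prev cur dist)
def Claim_changed_adjacent_pc_py : Prop := Dom_adjacent_pc_py (pvDiffWitness_adjacent_pc_py.1) (pvDiffWitness_adjacent_pc_py.2.1) (pvDiffWitness_adjacent_pc_py.2.2) ∧ D_adjacent_pc_py (pvDiffWitness_adjacent_pc_py.1) (pvDiffWitness_adjacent_pc_py.2.1) (pvDiffWitness_adjacent_pc_py.2.2) ∧ adjacent_pc_py (pvDiffWitness_adjacent_pc_py.1) (pvDiffWitness_adjacent_pc_py.2.1) (pvDiffWitness_adjacent_pc_py.2.2) = pvDiffWitnessOut_adjacent_pc_py.1 ∧ adjacent_pc_py_alt (pvDiffWitness_adjacent_pc_py.1) (pvDiffWitness_adjacent_pc_py.2.1) (pvDiffWitness_adjacent_pc_py.2.2) = pvDiffWitnessOut_adjacent_pc_py.2 ∧ pvDiffWitnessOut_adjacent_pc_py.1 ≠ pvDiffWitnessOut_adjacent_pc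_py.2
def Claim_exact_adjacent_pc_py : Prop := ∀ (prev : List Int) (cur : List Int) (dist : Int), Dom_adjacent_pc_py prev cur dist → D_adjacent_pc_py prev cur dist → adjacent_pc_py prev cur dist ≠ adjacent_pc_py_alt prev cur dist

-- ===== LEMMAS AND PROOFS =====
theorem mem_add_add_foldl (L : List Int) (f g : Int → Int) (t : List Int) (b : Int) :
    b ∈ L.foldl (fun t d => PySem.Set.add (PySem.Set.add t (f d)) (g d)) t ↔
      b ∈ t ∨ ∃ d ∈ L, b = f d ∨ b = g d := by
  induction L generalizing t with
  | nil => simp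
  | cons x xs ih =>
    simp only [List.foldl_cons, ih, PySem.Set.mem_add, List.mem_cons]
    constructor
    · rintro (((h | h) | h) | ⟨d, hd, h⟩)
      · exact Or.inl h
      · exact Or.inr ⟨x, Or.inl rfl, Or.inl h⟩
      · exact Or.inr ⟨x, Or.inl rfl, Or.inr h⟩
      · exact Or.inr ⟨d, Or.inr hd, h⟩
    · rintro (h | ⟨d, rfl | hd, h⟩)
      · exact Or.inl (Or.inl (Or.inl h))
      · rcases h with h | h
        · exact Or.inl (Or.inl (Or.inr h))
        · exact Or.inl (Or.inr h)
      · exact Or.inr ⟨d, hd, h⟩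

theorem mem_targets_foldl (A L : List Int) (t : List Int) (b : Int) :
    b ∈ A.foldl (fun t pc =>
        L.foldl (fun t d =>
          PySem.Set.add (PySem.Set.add t (PySem.Int.mod (pc + d) 12))
            (PySem.Int.mod (pc - d) 12)) t) t ↔
      b ∈ t ∨ ∃ a ∈ A, ∃ d ∈ L, b = PySem.Int.mod (a + d) 12 ∨ b = PySem.Int.mod (a - d) 12 := by
  induction A generalizing t with
  | nil => simp
  | cons x xs ih =>
    simp only [List.foldl_cons, ih, mem_add_add_foldl, List.mem_cons]
    constructor
    · rintro ((h | ⟨d, hd, h⟩) | ⟨a, ha, hrest⟩)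
      · exact Or.inl h
      · exact Or.inr ⟨x, Or.inl rfl, d, hd, h⟩
      · exact Or.inr ⟨a, Or.inr ha, hrest⟩
    · rintro (h | ⟨a, rfl | ha, d, hd, h⟩)
      · exact Or.inl (Or.inl h)
      · exact Or.inl (Or.inr ⟨d, hd, h⟩)
      · exact Or.inr ⟨a, ha, d, hd, h⟩

theorem mem_pcset (notes : List Int) (x : Int) :
    x ∈ pcset_py notes ↔ ∃ p ∈ notes, x = PySem.Int.mod p 12 := by
  unfold pcset_py
  rw [PySem.Set.mem_ofList]
  simp only [List.mem_map]
  constructor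
  · rintro ⟨p, hp, rfl⟩; exact ⟨p, hp, rfl⟩
  · rintro ⟨p, hp, rfl⟩; exact ⟨p, hp, rfl⟩

theorem pcset_bounds (notes : List Int) (x : Int) (hx : x ∈ pcset_py notes) :
    0 ≤ x ∧ x < 12 := by
  obtain ⟨p, -, rfl⟩ := (mem_pcset notes x).mp hx
  exact ⟨PySem.Int.mod_nonneg p (by norm_num), PySem.Int.mod_lt p (by norm_num)⟩

theorem targ_iff (a b dist : Int) :
    (∃ d ∈ PySem.List.pyRange 1 (dist + 1),
        b = PySem.Int.mod (a + d) 12 ∨ b = PySem.Int.mod (a - d) 12) ↔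
      (0 ≤ b ∧ b < 12 ∧
        (((b - a) % 12 = 0 ∧ 12 ≤ dist) ∨
          ((b - a) % 12 ≠ 0 ∧ ((b - a) % 12 ≤ dist ∨ 12 - (b - a) % 12 ≤ dist)))) := by
  have h12 : (0:Int) < 12 := by norm_num
  simp only [PySem.List.mem_pyRange_one, PySem.Int.mod_eq_emod_of_pos h12]
  constructor
  · rintro ⟨d, ⟨h1, h2⟩, h | h⟩ <;> omega
  · rintro ⟨hb0, hb1, ⟨h0, hd⟩ | ⟨h0, h | h⟩⟩
    · exact ⟨12, by omega, Or.inl (by omega)⟩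
    · exact ⟨(b - a) % 12, by omega, Or.inl (by omega)⟩
    · exact ⟨12 - (b - a) % 12, by omega, Or.inr (by omega)⟩

theorem btest_iff (a b dist : Int) :
    (1 ≤ min (PySem.Int.mod (b - a) 12) (PySem.Int.mod (a - b) 12) ∧
      min (PySem.Int.mod (b - a) 12) (PySem.Int.mod (a - b) 12) ≤ dist) ↔
      ((b - a) % 12 ≠ 0 ∧ ((b - a) % 12 ≤ dist ∨ 12 - (b - a) % 12 ≤ dist)) := by
  have h12 : (0:Int) < 12 := by norm_num
  rw [PySem.Int.mod_eq_emod_of_pos h12, PySem.Int.mod_eq_emod_of_pos h12]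
  omega

theorem pcset_nil : pcset_py [] = [] := rfl

-- ===== VERDICT (by name: the statement is the Claim_ definition above) =====
theorem adjacent_pc_py_spec : Claim_unchanged_adjacent_pc_py := by
  intro prev cur dist _ hnD
  unfold adjacent_pc_py adjacent_pc_py_alt
  dsimp only
  by_cases hempty : pcset_py prev = [] ∨ pcset_py cur = []
  · rw [if_pos hempty]
    rcases hempty with h | h
    · rw [List.countP_eq_zero.mpr (fun b _ => by simp [h])]
      rfl
    · simp [h]
  · rw [if_neg hempty]
    push_neg at hempty
    unfold PySem.Set.len PySem.Set.inter
    rw [← List.countP_eq_length_filter, Nat.cast_inj]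
    apply List.countP_congr
    intro b hb
    have hbB := pcset_bounds cur b hb
    rw [Bool.eq_iff_iff, PySem.Set.contains_eq_listContains, List.contains_iff_mem,
      mem_targets_foldl]
    simp only [PySem.Set.empty, List.not_mem_nil, false_or, List.any_eq_true,
      decide_eq_true_eq, iff_true]
    by_cases hdist : dist < 12
    · constructor
      · rintro ⟨a, ha, hd⟩
        refine ⟨a, ha, ?_⟩
        have := (targ_iff a b dist).mp hd
        rw [btest_iff]
        omega
      · rintro ⟨a, ha, hd⟩
        refine ⟨a, ha, ?_⟩
        rw [btest_iff] at hd
        rw [targ_iff]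
        omega
    · -- dist ≥ 12; use ¬D_ to find a prev pitch class distinct from b
      push_neg at hdist
      have hprevne : prev ≠ [] := by
        intro h; exact (hempty.1 (by rw [h, pcset_nil]))
      unfold D_adjacent_pc_py at hnD
      push_neg at hnD
      constructor
      · rintro ⟨a, ha, -⟩
        -- find some a' ∈ A with (b - a') % 12 ≠ 0
        rcases Decidable.em (∀ p ∈ prev, PySem.Int.mod p 12 = PySem.Int.mod prev.head! 12) with hall | hall
        · -- then b ≠ mod head! since no c in cur matches
          have hnoc := hnD hdist hprevne hall
          obtain ⟨c, hc, rfl⟩ := (mem_pcset cur b).mp hb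
          have hbne : PySem.Int.mod c 12 ≠ PySem.Int.mod prev.head! 12 := hnoc c hc
          obtain ⟨p, hp, rfl⟩ := (mem_pcset prev a).mp ha
          have := hall p hp
          refine ⟨PySem.Int.mod p 12, ha, ?_⟩
          rw [btest_iff]
          have hc0 := PySem.Int.mod_nonneg c (show (0:Int) < 12 by norm_num)
          have hc1 := PySem.Int.mod_lt c (show (0:Int) < 12 by norm_num)
          have hp0 := PySem.Int.mod_nonneg p (show (0:Int) < 12 by norm_num)
          have hp1 := PySem.Int.mod_lt p (show (0:Int) < 12 by norm_num)
          omega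
        · push_neg at hall
          obtain ⟨p, hp, hpne⟩ := hall
          have hhead : prev.head! ∈ prev := List.head!_mem_self hprevne
          have ha1 : PySem.Int.mod p 12 ∈ pcset_py prev :=
            (mem_pcset prev _).mpr ⟨p, hp, rfl⟩
          have ha2 : PySem.Int.mod prev.head! 12 ∈ pcset_py prev :=
            (mem_pcset prev _).mpr ⟨prev.head!, hhead, rfl⟩
          rcases Decidable.em (b = PySem.Int.mod p 12) with hbeq | hbeq
          · refine ⟨PySem.Int.mod prev.head! 12, ha2, ?_⟩
            rw [btest_iff]
            have h0 := pcset_bounds prev _ ha2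
            omega
          · refine ⟨PySem.Int.mod p 12, ha1, ?_⟩
            rw [btest_iff]
            have h0 := pcset_bounds prev _ ha1
            omega
      · rintro ⟨a, ha, -⟩
        refine ⟨a, ha, ?_⟩
        rw [targ_iff]
        exact ⟨hbB.1, hbB.2, by omega⟩

theorem adjacent_pc_py_changed : Claim_changed_adjacent_pc_py := by
  unfold Claim_changed_adjacent_pc_py; decide

theorem adjacent_pc_py_tight : Claim_exact_adjacent_pc_py := by
  intro prev cur dist _ hD
  obtain ⟨hd12, hprevne, hall, c0, hc0, hc0m⟩ := hD
  unfold adjacent_pc_py adjacent_pc_py_alt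
  dsimp only
  have hA0 : PySem.Int.mod prev.head! 12 ∈ pcset_py prev :=
    (mem_pcset prev _).mpr ⟨prev.head!, List.head!_mem_self hprevne, rfl⟩
  have hB0 : PySem.Int.mod prev.head! 12 ∈ pcset_py cur :=
    (mem_pcset cur _).mpr ⟨c0, hc0, hc0m.symm⟩
  have hAe : pcset_py prev ≠ [] := fun h => by simp [h] at hA0
  have hBe : pcset_py cur ≠ [] := fun h => by simp [h] at hB0
  rw [if_neg (by simp [hAe, hBe])]
  unfold PySem.Set.len PySem.Set.inter
  rw [← List.countP_eq_length_filter]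
  -- A-side: every b ∈ B is in targets, so the count is B.length
  have hAside : (pcset_py cur).countP
      (fun b => PySem.Set.contains ((pcset_py prev).foldl (fun t pc =>
        (PySem.List.pyRange 1 (dist + 1)).foldl (fun t d =>
          PySem.Set.add (PySem.Set.add t (PySem.Int.mod (pc + d) 12))
            (PySem.Int.mod (pc - d) 12)) t) PySem.Set.empty) b) = (pcset_py cur).length := by
    apply List.countP_eq_length.mpr
    intro b hb
    have hbB := pcset_bounds cur b hb
    rw [PySem.Set.contains_eq_listContains, List.contains_iff_mem, mem_targets_foldl]
    refine Or.inr ⟨PySem.Int.mod prev.head! 12, hA0, ?_⟩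
    rw [targ_iff]
    exact ⟨hbB.1, hbB.2, by omega⟩
  rw [hAside]
  -- B-side: exactly the elements of B other than mod head! are counted
  have hcongr : (pcset_py cur).countP (fun b => (pcset_py prev).any (fun a =>
      let m := min (PySem.Int.mod (b - a) 12) (PySem.Int.mod (a - b) 12)
      decide (1 ≤ m ∧ m ≤ dist))) =
      (pcset_py cur).countP (fun b => decide (b ≠ PySem.Int.mod prev.head! 12)) := by
    apply List.countP_congr
    intro b hb
    have hbB := pcset_bounds cur b hb
    rw [Bool.eq_iff_iff]
    simp only [List.any_eq_true, decide_eq_true_eq, iff_true]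
    constructor
    · rintro ⟨a, ha, hd⟩
      rw [btest_iff] at hd
      obtain ⟨p, hp, rfl⟩ := (mem_pcset prev a).mp ha
      have := hall p hp
      have h0 := pcset_bounds prev _ ha
      omega
    · intro hbne
      refine ⟨PySem.Int.mod prev.head! 12, hA0, ?_⟩
      rw [btest_iff]
      have h0 := pcset_bounds prev _ hA0
      omega
  rw [hcongr]
  have hnodup : (pcset_py cur).Nodup := by
    unfold pcset_py; exact PySem.Set.nodup_ofList _
  have hsplit : (pcset_py cur).countP (fun b => decide (b ≠ PySem.Int.mod prev.head! 12)) +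
      (pcset_py cur).count (PySem.Int.mod prev.head! 12) = (pcset_py cur).length := by
    have h := List.length_eq_countP_add_countP
      (p := fun b => decide (b ≠ PySem.Int.mod prev.head! 12)) (l := pcset_py cur)
    rw [List.count_eq_countP, h]
    congr 1
    apply List.countP_congr
    intro b _
    by_cases hb : b = PySem.Int.mod prev.head! 12 <;> simp [hb]
  have hcount1 : (pcset_py cur).count (PySem.Int.mod prev.head! 12) = 1 :=
    List.count_eq_one_of_mem hnodup hB0
  have hlen : 1 ≤ (pcset_py cur).length := List.length_pos_of_mem hB0
  omega
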